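-- pv_equiv track=rewrite | github.com/estyrke/AoC | aoc/2019/16.py | transform
-- ===== SOURCE A (Python) =====
-- import itertools
-- import operator
--
-- def duplicate(iterable, n):
--     for e in itertools.cycle(iterable):
--         yield from itertools.repeat(e, n)
--
-- def transform(data, pattern, offset=0):
--     for i in range(len(data)):
--         s = sum(
--             map(
--                 operator.mul,
--                 data,
--                 itertools.islice(duplicate(pattern, offset + i + 1), 1, None),
--             )
--         )
--         if s > 0:
--             yield s % 10
--         else:
--             yield (-s) % 10
-- ===== SOURCE B (Python) =====
-- def transform(data, pattern, offset=0):
--     L = len(pattern)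
--     m = len(data)
--     if L == 0:
--         for _ in data:
--             yield 0
--         return
--     prefix = [0] * (m + 1)
--     for k, d in enumerate(data):
--         prefix[k + 1] = prefix[k] + d
--     for i in range(m):
--         n = offset + i + 1
--         s = 0
--         b = 0
--         while max(b * n - 1, 0) < m:
--             lo = max(b * n - 1, 0)
--             hi = min((b + 1) * n - 1, m)
--             s += pattern[b % L] * (prefix[hi] - prefix[lo])
--             b += 1
--         yield abs(s) % 10
-- ===== Notes on version B (the rewrite author's own statement) =====
-- stated objective: faster
-- what changed: Replaces A's per-digit walk over the whole cycled-pattern generator stream (O(m) per digit) by a prefix-sum array over data plus one multiply per constant-weight pattern block (O(m/n+1) per digit), yielding roughly O(m log m) instead of O(m^2); the excluded inputs are only those where A diverges (nonempty data and pattern with offset < 0 make A's duplicate() generator cycle forever).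
import Mathlib
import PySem

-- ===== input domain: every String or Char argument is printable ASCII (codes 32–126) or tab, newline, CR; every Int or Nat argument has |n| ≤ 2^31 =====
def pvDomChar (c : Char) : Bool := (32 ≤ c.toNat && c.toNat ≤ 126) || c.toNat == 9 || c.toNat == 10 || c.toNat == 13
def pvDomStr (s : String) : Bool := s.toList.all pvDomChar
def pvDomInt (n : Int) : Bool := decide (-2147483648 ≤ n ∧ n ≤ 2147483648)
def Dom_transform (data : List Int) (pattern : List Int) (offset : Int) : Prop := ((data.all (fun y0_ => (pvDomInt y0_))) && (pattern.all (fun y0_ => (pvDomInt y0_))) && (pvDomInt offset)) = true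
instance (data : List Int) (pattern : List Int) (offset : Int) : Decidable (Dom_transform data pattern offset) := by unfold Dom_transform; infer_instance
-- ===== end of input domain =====

-- B replaces A's per-digit walk over the whole cycled-pattern stream by prefix sums of data,
-- adding one constant-weight pattern block at a time.  Both Pythons are generators; the
-- equivalence is about the produced sequence of values (as a List Int).

-- ===== PORT A =====
-- A's helper `duplicate(pattern, n)` cycles `pattern`, repeating each element n times;
-- `islice(..., 1, None)` drops the first stream element, and `map` consumes exactly
-- data.length stream elements.  The stream is ported by its generator state:
-- pIdx = current position in pattern (cycled), rep = copies of pattern[pIdx] already produced.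
def takeDupAux (pattern : List Int) (n : Nat) : Nat → Nat → Nat → List Int
  | 0, _, _ => []
  | count + 1, pIdx, rep =>
      let st := if rep ≥ n then ((pIdx + 1) % pattern.length, 0) else (pIdx, rep)
      pattern.getD st.1 0 :: takeDupAux pattern n count st.1 (st.2 + 1)

-- n is taken as (offset+i+1).toNat: A only terminates when that quantity is ≥ 1
-- (for n ≤ 0 the Python generator cycles forever yielding nothing; excluded by Pre_).
def transform (data : List Int) (pattern : List Int) (offset : Int) : List Int :=
  (List.range data.length).map (fun (i : Nat) =>
    let ws := takeDupAux pattern (offset + (i : Int) + 1).toNat data.length 0 1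
    let s := (data.zip ws).foldl (fun a p => a + p.1 * p.2) 0
    if s > 0 then PySem.Int.mod s 10 else PySem.Int.mod (-s) 10)

-- ===== PORT B =====
-- prefix-sum list: pfxList a [d0,d1,...] = [a, a+d0, a+d0+d1, ...]
def pfxList (a : Int) : List Int → List Int
  | [] => [a]
  | d :: rest => a :: pfxList (a + d) rest

-- Source B's while loop over pattern blocks b = 0,1,…; `fuel` only makes the loop total
-- (for n ≥ 1 it runs at most m+2 times).  All of Source B's indices here are nonnegative,
-- so Nat subtraction b*n-1 is exactly Python's max(b*n - 1, 0).
def blocks (pattern pfx : List Int) (n m : Nat) : Nat → Nat → Int → Int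
  | 0, _, s => s
  | fuel + 1, b, s =>
      if b * n - 1 < m then
        blocks pattern pfx n m fuel (b + 1)
          (s + pattern.getD (b % pattern.length) 0 *
            (pfx.getD (min ((b + 1) * n - 1) m) 0 - pfx.getD (b * n - 1) 0))
      else s

def transform_alt (data : List Int) (pattern : List Int) (offset : Int) : List Int :=
  if pattern.length = 0 then data.map (fun _ => 0)
  else
    (List.range data.length).map (fun (i : Nat) =>
      let s := blocks pattern (pfxList 0 data) (offset + (i : Int) + 1).toNat
                 data.length (data.length + 2) 0 0
      PySem.Int.mod |s| 10)

-- ===== PRECONDITION & SPEC =====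
-- Pre_ excludes exactly the inputs on which A DIVERGES: with nonempty data and nonempty
-- pattern and offset < 0, A's duplicate() generator cycles forever producing nothing
-- (itertools.repeat(e, n) with n ≤ 0 is empty), so listing A's output never terminates.
def Pre_transform (data : List Int) (pattern : List Int) (offset : Int) : Prop :=
  data = [] ∨ pattern = [] ∨ 0 ≤ offset
instance (data : List Int) (pattern : List Int) (offset : Int) : Decidable (Pre_transform data pattern offset) := by unfold Pre_transform; infer_instance
def pvWitness_transform : List Int × List Int × Int := ([1, 2, 3, 4, 5], [0, 1, 0, -1], 0)
def Spec_transform (data : List Int) (pattern : List Int) (offset : Int) (out : List Int) : Prop := out = transform_alt data pattern offset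
instance (data : List Int) (pattern : List Int) (offset : Int) (out : List Int) : Decidable (Spec_transform data pattern offset out) := by unfold Spec_transform; infer_instance

-- ===== CLAIM (what is proved, stated in full; the proofs are below) =====
def Claim_equal_transform : Prop := ∀ (data : List Int) (pattern : List Int) (offset : Int), Dom_transform data pattern offset → Pre_transform data pattern offset → Spec_transform data pattern offset (transform data pattern offset)

-- ===== LEMMAS AND PROOFS =====

-- the common closed form: the weight of data[k] in digit i's sum is pattern[((k+1)/n) % L]
def wgt (pattern : List Int) (n k : Nat) : Int :=
  pattern.getD (((k + 1) / n) % pattern.length) 0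

def iSum (data pattern : List Int) (n lo hi : Nat) : Int :=
  ∑ k ∈ Finset.Ico lo hi, data.getD k 0 * wgt pattern n k

theorem takeDupAux_eq (pattern : List Int) (n : Nat) (hn : 1 ≤ n) :
    ∀ (count pIdx rep : Nat), pIdx < pattern.length → 1 ≤ rep → rep ≤ n →
    takeDupAux pattern n count pIdx rep =
      (List.range count).map (fun t =>
        pattern.getD ((pIdx + (rep + t) / n) % pattern.length) 0) := by
  intro count
  induction count with
  | zero => intro pIdx rep _ _ _; simp [takeDupAux]
  | succ c ih =>
    intro pIdx rep hp h1 h2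
    have hL : 0 < pattern.length := Nat.lt_of_le_of_lt (Nat.zero_le _) hp
    by_cases hrep : rep ≥ n
    · have hrn : rep = n := le_antisymm h2 hrep
      simp only [takeDupAux, if_pos hrep]
      rw [ih ((pIdx + 1) % pattern.length) 1 (Nat.mod_lt _ hL) le_rfl hn]
      rw [List.range_succ_eq_map, List.map_cons, List.map_map]
      congr 1
      · rw [hrn]; norm_num [Nat.div_self (show 0 < n by omega)]
      · apply List.map_congr_left
        intro t _
        simp only [Function.comp]
        have h3 : rep + (t + 1) = (1 + t) + n := by omega
        rw [h3, Nat.add_div_right _ (by omega : 0 < n)]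
        rw [Nat.mod_add_mod]
        congr 2
        omega
    · rw [not_le] at hrep
      simp only [takeDupAux, if_neg (by omega : ¬ rep ≥ n)]
      rw [ih pIdx (rep + 1) hp (by omega) (by omega)]
      rw [List.range_succ_eq_map, List.map_cons, List.map_map]
      congr 1
      · rw [Nat.add_zero, Nat.div_eq_of_lt hrep, Nat.add_zero, Nat.mod_eq_of_lt hp]
      · apply List.map_congr_left
        intro t _
        simp only [Function.comp]
        have h4 : rep + (t + 1) = rep + 1 + t := by omega
        rw [h4]

theorem zip_foldl_sum' (l w : List Int) (h : l.length ≤ w.length) :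
    ∀ s : Int, (l.zip w).foldl (fun a p => a + p.1 * p.2) s =
      s + ∑ k ∈ Finset.range l.length, l.getD k 0 * w.getD k 0 := by
  induction l generalizing w with
  | nil => intro s; simp
  | cons d l' ih =>
    cases w with
    | nil => simp at h
    | cons w0 w' =>
      intro s
      simp only [List.zip_cons_cons, List.foldl_cons, List.length_cons]
      rw [ih w' (by simpa using h) (s + d * w0)]
      rw [Finset.sum_range_succ']
      simp only [List.getD_cons_succ, List.getD_cons_zero]
      ring


theorem pfxList_getD (data : List Int) :
    ∀ (j : Nat) (a : Int), j ≤ data.length →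
    (pfxList a data).getD j 0 = a + ∑ k ∈ Finset.range j, data.getD k 0 := by
  induction data with
  | nil =>
    intro j a hj
    have hj0 : j = 0 := by simpa using hj
    subst hj0; simp [pfxList]
  | cons d rest ih =>
    intro j a hj
    cases j with
    | zero => simp [pfxList]
    | succ j' =>
      simp only [pfxList, List.getD_cons_succ]
      rw [ih j' (a + d) (by simpa using hj), Finset.sum_range_succ']
      simp [add_assoc]
      ring




theorem blocks_eq (data pattern : List Int) (n : Nat) (hn : 1 ≤ n) :
    ∀ (fuel b : Nat) (s : Int), data.length + 2 ≤ fuel + b →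
    blocks pattern (pfxList 0 data) n data.length fuel b s =
      s + iSum data pattern n (b * n - 1) data.length := by
  intro fuel
  induction fuel with
  | zero =>
    intro b s hf
    have hbn : b ≤ b * n := Nat.le_mul_of_pos_right b (by omega)
    simp only [blocks]
    rw [iSum, Finset.Ico_eq_empty (by omega)]
    simp
  | succ f ih =>
    intro b s hf
    by_cases hc : b * n - 1 < data.length
    · simp only [blocks, if_pos hc]
      rw [ih (b + 1) _ (by omega)]
      have hmul : (b + 1) * n = b * n + n := by ring
      have hb1 : b * n - 1 ≤ (b + 1) * n - 1 := by omega
      have hlohi : b * n - 1 ≤ min ((b + 1) * n - 1) data.length :=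
        le_min hb1 (le_of_lt hc)
      have hhim : min ((b + 1) * n - 1) data.length ≤ data.length := min_le_right _ _
      rw [pfxList_getD data _ 0 hhim, pfxList_getD data _ 0 (le_of_lt hc)]
      have hseg : (0 + ∑ k ∈ Finset.range (min ((b + 1) * n - 1) data.length), data.getD k 0) -
          (0 + ∑ k ∈ Finset.range (b * n - 1), data.getD k 0) =
          ∑ k ∈ Finset.Ico (b * n - 1) (min ((b + 1) * n - 1) data.length), data.getD k 0 := by
        rw [Finset.sum_Ico_eq_sub _ hlohi]; ring
      rw [hseg, Finset.mul_sum]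
      have hw : ∀ k ∈ Finset.Ico (b * n - 1) (min ((b + 1) * n - 1) data.length),
          pattern.getD (b % pattern.length) 0 * data.getD k 0 = data.getD k 0 * wgt pattern n k := by
        intro k hk
        simp only [Finset.mem_Ico] at hk
        have hk2 : k < (b + 1) * n - 1 := lt_of_lt_of_le hk.2 (min_le_left _ _)
        have hdiv : (k + 1) / n = b := by
          have h5 : b * n ≤ k + 1 := by omega
          have h6 : k + 1 < (b + 1) * n := by omega
          exact Nat.div_eq_of_lt_le h5 (by simpa [Nat.succ_mul] using h6)
        rw [wgt, hdiv, mul_comm]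
      rw [Finset.sum_congr rfl hw]
      have hsplit : iSum data pattern n (b * n - 1) data.length =
          (∑ k ∈ Finset.Ico (b * n - 1) (min ((b + 1) * n - 1) data.length),
            data.getD k 0 * wgt pattern n k) + iSum data pattern n ((b + 1) * n - 1) data.length := by
        by_cases hcase : (b + 1) * n - 1 ≤ data.length
        · rw [min_eq_left hcase, iSum, iSum, Finset.sum_Ico_consecutive _ hb1 hcase]
        · rw [min_eq_right (by omega), iSum, iSum,
            Finset.Ico_eq_empty (show ¬ (b + 1) * n - 1 < data.length by omega)]
          rw [Finset.sum_Ico_eq_sub _ (le_of_lt hc)]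
          simp
      rw [hsplit]; ring
    · simp only [blocks, if_neg hc]
      rw [iSum, Finset.Ico_eq_empty (by omega)]
      simp

theorem map_range_getD (f : Nat → Int) (m k : Nat) (hk : k < m) :
    ((List.range m).map f).getD k 0 = f k := by
  rw [List.getD_eq_getElem?_getD]
  simp [hk]

-- the two per-digit sums coincide
theorem digit_eq (data pattern : List Int) (n : Nat) (hn : 1 ≤ n) (hL : pattern.length ≠ 0) :
    (data.zip (takeDupAux pattern n data.length 0 1)).foldl (fun a p => a + p.1 * p.2) 0 =
      blocks pattern (pfxList 0 data) n data.length (data.length + 2) 0 0 := by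
  rw [takeDupAux_eq pattern n hn data.length 0 1 (by omega) le_rfl hn]
  rw [zip_foldl_sum' _ _ (by simp) 0]
  rw [blocks_eq data pattern n hn _ 0 0 (by omega)]
  simp only [zero_add, Nat.zero_mul, Nat.zero_sub]
  rw [iSum, ← Finset.range_eq_Ico]
  apply Finset.sum_congr rfl
  intro k hk
  simp only [Finset.mem_range] at hk
  rw [map_range_getD _ _ _ hk, wgt, Nat.add_comm 1 k]

theorem takeDupAux_nil (n : Nat) :
    ∀ (count pIdx rep : Nat), takeDupAux [] n count pIdx rep = List.replicate count 0 := by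
  intro count
  induction count with
  | zero => intro pIdx rep; simp [takeDupAux]
  | succ c ih => intro pIdx rep; simp [takeDupAux, List.replicate_succ, ih]

theorem zip_replicate_zero (l : List Int) :
    ∀ (c : Nat) (s : Int),
      (l.zip (List.replicate c (0 : Int))).foldl (fun a p => a + p.1 * p.2) s = s := by
  induction l with
  | nil => intro c s; simp
  | cons d l' ih =>
    intro c s
    cases c with
    | zero => simp
    | succ c' => simp [List.replicate_succ, ih]

-- ===== VERDICT (by name: the statement is the Claim_ definition above) =====
theorem transform_spec : Claim_equal_transform := by
  intro data pattern offset _ hpre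
  unfold Spec_transform transform transform_alt
  by_cases hL : pattern.length = 0
  · have hpat : pattern = [] := List.length_eq_zero_iff.mp hL
    subst hpat
    simp only [List.length_nil, reduceIte]
    have hlist : ∀ i, i ∈ List.range data.length →
        (fun (i : Nat) => let ws := takeDupAux [] (offset + (i : Int) + 1).toNat data.length 0 1
                  let s := (data.zip ws).foldl (fun a p => a + p.1 * p.2) 0
                  if s > 0 then PySem.Int.mod s 10 else PySem.Int.mod (-s) 10) i = (0 : Int) := by
      intro i _
      simp only [takeDupAux_nil, zip_replicate_zero]
      norm_num [PySem.Int.mod]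
    rw [List.map_congr_left hlist]
    have h1 : (List.range data.length).map (fun _ => (0 : Int)) = List.replicate data.length 0 := by
      simp
    have h2 : data.map (fun _ => (0 : Int)) = List.replicate data.length 0 := by
      simp
    rw [h1, h2]
  · rw [if_neg hL]
    apply List.map_congr_left
    intro i hi
    simp only [List.mem_range] at hi
    have hdne : data ≠ [] := by
      intro h; subst h; simp at hi
    have hoff : 0 ≤ offset := by
      rcases hpre with h | h | h
      · exact absurd h hdne
      · exact absurd (congrArg List.length h) (by simpa using hL)
      · exact h
    have hn1 : 1 ≤ (offset + (i : Int) + 1).toNat := by omega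
    simp only []
    rw [digit_eq data pattern _ hn1 hL]
    by_cases hs : blocks pattern (pfxList 0 data) (offset + (i : Int) + 1).toNat
        data.length (data.length + 2) 0 0 > 0
    · rw [if_pos hs]
      congr 1
      exact (abs_of_pos hs).symm
    · rw [if_neg hs]
      congr 1
      exact (abs_of_nonpos (le_of_not_gt hs)).symm
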